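-- pv_equiv track=rewrite | github.com/miguelraad28/tpo-fi | tpo.py | facturacion_costos_eventos
-- ===== SOURCE A (Python) =====
-- def facturacion_costos_eventos(tipo_evento, datos):
--     if tipo_evento == 0:
--         # 1) Total de la facturación del mes, los costos y cuantos eventos fueron
--         total_facturacion = 0
--         for evento in datos:
--             total_facturacion += evento[1]
--
--         total_costos = 0
--         for evento in datos:
--             total_costos += evento[2]
--
--         cantidad_eventos = len(datos)
--     else:
--         # Muestra por tipo de evento
--         total_facturacion = 0
--         for evento in datos:
--             if evento[0] == tipo_evento:
--                 total_facturacion += evento[1]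
--
--         total_costos = 0
--         for evento in datos:
--             if evento[0] == tipo_evento:
--                 total_costos += evento[2]
--
--         cantidad_eventos = 0
--         for evento in datos:
--             if evento[0] == tipo_evento:
--                 cantidad_eventos += 1
--
--     return total_facturacion, total_costos, cantidad_eventos
-- ===== SOURCE B (Python) =====
-- def facturacion_costos_eventos(tipo_evento, datos):
--     total_facturacion = 0
--     total_costos = 0
--     cantidad_eventos = 0
--     for evento in datos:
--         if tipo_evento == 0 or evento[0] == tipo_evento:
--             total_facturacion += evento[1]
--             total_costos += evento[2]
--             cantidad_eventos += 1
--     return total_facturacion, total_costos, cantidad_eventos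
-- ===== Notes on version B (the rewrite author's own statement) =====
-- stated objective: simpler
-- what changed: Replaces A's two branches with up to five sequential scans by one single-pass loop accumulating all three totals under a unified predicate (tipo_evento==0 matches everything).
import Mathlib
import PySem

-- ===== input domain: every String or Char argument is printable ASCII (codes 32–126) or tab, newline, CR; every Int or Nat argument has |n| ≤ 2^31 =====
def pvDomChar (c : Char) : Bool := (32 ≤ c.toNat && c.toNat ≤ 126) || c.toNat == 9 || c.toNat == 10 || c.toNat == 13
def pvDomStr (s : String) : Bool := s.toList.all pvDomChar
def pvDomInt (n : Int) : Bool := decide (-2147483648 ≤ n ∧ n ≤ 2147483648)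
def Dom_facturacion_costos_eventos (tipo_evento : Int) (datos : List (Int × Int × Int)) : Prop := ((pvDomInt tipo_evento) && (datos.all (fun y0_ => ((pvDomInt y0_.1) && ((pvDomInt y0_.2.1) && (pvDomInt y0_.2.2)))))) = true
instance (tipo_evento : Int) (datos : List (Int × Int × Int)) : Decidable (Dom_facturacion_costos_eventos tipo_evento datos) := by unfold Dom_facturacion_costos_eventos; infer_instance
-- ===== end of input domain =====

-- ===== PORT A =====
-- Literal transliteration of A: branch on tipo_evento == 0; separate sequential passes.
def facturacion_costos_eventos (tipo_evento : Int) (datos : List (Int × Int × Int)) : Int × Int × Int :=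
  if tipo_evento == 0 then
    let total_facturacion := datos.foldl (fun acc evento => acc + evento.2.1) 0
    let total_costos := datos.foldl (fun acc evento => acc + evento.2.2) 0
    let cantidad_eventos : Int := datos.length
    (total_facturacion, total_costos, cantidad_eventos)
  else
    let total_facturacion := datos.foldl (fun acc evento => if evento.1 == tipo_evento then acc + evento.2.1 else acc) 0
    let total_costos := datos.foldl (fun acc evento => if evento.1 == tipo_evento then acc + evento.2.2 else acc) 0
    let cantidad_eventos := datos.foldl (fun acc evento => if evento.1 == tipo_evento then acc + 1 else acc) (0 : Int)
    (total_facturacion, total_costos, cantidad_eventos)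

-- ===== PORT B =====
-- Literal transliteration of B: one fused pass with a triple accumulator and a unified predicate.
def facturacion_costos_eventos_alt (tipo_evento : Int) (datos : List (Int × Int × Int)) : Int × Int × Int :=
  datos.foldl
    (fun acc evento =>
      if tipo_evento == 0 || evento.1 == tipo_evento then
        (acc.1 + evento.2.1, acc.2.1 + evento.2.2, acc.2.2 + 1)
      else acc)
    ((0 : Int), (0 : Int), (0 : Int))

-- ===== PRECONDITION & SPEC =====
def Spec_facturacion_costos_eventos (tipo_evento : Int) (datos : List (Int × Int × Int)) (out : Int × Int × Int) : Prop := out = facturacion_costos_eventos_alt tipo_evento datos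
instance (tipo_evento : Int) (datos : List (Int × Int × Int)) (out : Int × Int × Int) : Decidable (Spec_facturacion_costos_eventos tipo_evento datos out) := by unfold Spec_facturacion_costos_eventos; infer_instance

-- ===== CLAIM (what is proved, stated in full; the proofs are below) =====
def Claim_equal_facturacion_costos_eventos : Prop := ∀ (tipo_evento : Int) (datos : List (Int × Int × Int)), Dom_facturacion_costos_eventos tipo_evento datos → Spec_facturacion_costos_eventos tipo_evento datos (facturacion_costos_eventos tipo_evento datos)

-- ===== LEMMAS AND PROOFS =====

-- The fused triple fold (with an arbitrary predicate) splits into three component folds.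
lemma fused_split (p : Int × Int × Int → Bool) (l : List (Int × Int × Int)) (a b c : Int) :
    l.foldl (fun acc e => if p e then (acc.1 + e.2.1, acc.2.1 + e.2.2, acc.2.2 + 1) else acc) (a, b, c)
    = (l.foldl (fun x e => if p e then x + e.2.1 else x) a,
       l.foldl (fun x e => if p e then x + e.2.2 else x) b,
       l.foldl (fun x e => if p e then x + 1 else x) c) := by
  induction l generalizing a b c with
  | nil => rfl
  | cons e l ih =>
    simp only [List.foldl_cons]
    by_cases h : p e = true
    · rw [if_pos h, if_pos h, if_pos h, if_pos h, ih]
    · rw [if_neg h, if_neg h, if_neg h, if_neg h, ih]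

-- Counting with a trivial predicate is the length.
lemma fold_count_true (l : List (Int × Int × Int)) (a : Int) :
    l.foldl (fun x _ => x + 1) a = a + l.length := by
  induction l generalizing a with
  | nil => simp
  | cons e l ih => simp only [List.foldl_cons, List.length_cons, ih]; push_cast; ring

-- ===== VERDICT (by name: the statement is the Claim_ definition above) =====
theorem facturacion_costos_eventos_spec : Claim_equal_facturacion_costos_eventos := by
  intro t datos _
  unfold Spec_facturacion_costos_eventos facturacion_costos_eventos facturacion_costos_eventos_alt
  rw [fused_split (fun e => t == 0 || e.1 == t) datos 0 0 0]
  by_cases ht : (t == 0) = true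
  · simp [ht, fold_count_true]
  · simp [eq_false_of_ne_true ht]
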